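-- pv_equiv track=rewrite | github.com/freerailway/igmn | tfproc.py | net_compare
-- ===== SOURCE A (Python) =====
-- def bfs_net(net, deep_remain, key_set):
-- 	this_layer = [set([x for j in [list(net[k][i]) for k in key_set] for x in j]) for i in range(2)]
-- 	next_key = [[x for x in this_layer[i] if x in net] for i in range(2)]
-- 	if deep_remain > 1:
-- 		next_layer = [bfs_net(net, deep_remain - 1, next_key[i])[i] for i in range(2)]
-- 	else:
-- 		next_layer = [set([]),set([])]
-- 	return [this_layer[i] | next_layer[i] for i in range(2)]
--
-- def net_compare(nbig, nsmall):
-- 	max_deep = 2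
-- 	agree = "a"
-- 	for key in nsmall:
-- 		if not key in nbig:
-- 			return "b"
-- 		results = bfs_net(nbig, max_deep, set([key]))
-- 		ks = nsmall[key]
-- 		if results[0] & ks[0] != ks[0] or results[1] & ks[1] != ks[1]:
-- 			agree = "b"
-- 			break
-- 	return agree
-- ===== SOURCE B (Python) =====
-- def bfs_iter(net, key, i, max_deep):
-- 	acc = set()
-- 	frontier = {key}
-- 	for _ in range(max_deep):
-- 		layer = set()
-- 		for k in frontier:
-- 			layer |= set(net[k][i])
-- 		acc |= layer
-- 		frontier = {x for x in layer if x in net}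
-- 	return acc
--
-- def net_compare(nbig, nsmall):
-- 	max_deep = 2
-- 	for key in nsmall:
-- 		if not key in nbig:
-- 			return "b"
-- 		ks = nsmall[key]
-- 		if not (set(ks[0]) <= bfs_iter(nbig, key, 0, max_deep) and set(ks[1]) <= bfs_iter(nbig, key, 1, max_deep)):
-- 			return "b"
-- 	return "a"
-- ===== Notes on version B (the rewrite author's own statement) =====
-- stated objective: simpler
-- what changed: The recursive bfs_net (which at every level builds the layers for BOTH tuple indices and discards one of them in each recursive call) is replaced by a per-index iterative frontier/accumulator BFS looping over the depth levels, and the subset test is written directly as set inclusion instead of 'results[i] & ks[i] != ks[i]'.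
-- outside the precondition, e.g. on net_compare({'x': [{'y'}, {'y'}], 'z': []}, {'x': [set(), set()]}): A returns 'a', B returns 'a'; on net_compare({'x': [{'y'}, set()], 'y': [{'z'}]}, {'x': [{'q'}, set()]}): A raises IndexError, B returns 'b'
import Mathlib
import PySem

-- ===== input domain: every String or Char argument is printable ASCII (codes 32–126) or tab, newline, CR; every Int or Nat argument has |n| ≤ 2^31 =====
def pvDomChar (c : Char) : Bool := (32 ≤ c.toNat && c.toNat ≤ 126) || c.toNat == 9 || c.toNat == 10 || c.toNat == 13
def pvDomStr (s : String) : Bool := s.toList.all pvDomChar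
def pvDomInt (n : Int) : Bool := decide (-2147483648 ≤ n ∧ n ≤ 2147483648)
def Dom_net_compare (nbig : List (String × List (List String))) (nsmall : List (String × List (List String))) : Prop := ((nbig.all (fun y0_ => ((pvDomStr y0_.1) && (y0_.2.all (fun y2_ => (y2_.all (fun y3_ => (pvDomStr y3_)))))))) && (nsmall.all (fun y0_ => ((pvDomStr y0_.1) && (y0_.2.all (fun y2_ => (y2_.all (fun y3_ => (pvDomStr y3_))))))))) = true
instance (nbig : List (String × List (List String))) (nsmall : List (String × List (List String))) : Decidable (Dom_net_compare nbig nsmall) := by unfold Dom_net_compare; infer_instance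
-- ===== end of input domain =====

-- B replaces the recursive two-index bfs_net by a per-index iterative frontier/accumulator BFS
-- (objective: simpler — no recursion, no computing both indices and discarding one).

-- ===== PORT A =====
-- bfs_net(net, deep_remain, key_set): dicts are PySem.Dict, Python sets are PySem.Set.
-- net[k][i] is ported as pyGetD (net.getD k []) i []: inside bfs_net every k is filtered
-- by 'x in net' (no KeyError) and Pre_ guarantees every indexed row has length ≥ 2
-- (Python raises IndexError on shorter rows; those inputs are outside Pre_).
def bfsNet (net : PySem.Dict String (List (List String))) (deepRemain : Int)
    (keySet : PySem.Set String) : List (PySem.Set String) :=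
  let thisLayer : List (PySem.Set String) :=
    (PySem.List.pyRange 0 2 1).map (fun i =>
      PySem.Set.ofList ((keySet.map (fun k => PySem.List.pyGetD (net.getD k []) i [])).flatten))
  let nextKey : List (List String) :=
    (PySem.List.pyRange 0 2 1).map (fun i =>
      (PySem.List.pyGetD thisLayer i []).filter (fun x => net.contains x))
  let nextLayer : List (PySem.Set String) :=
    if h : deepRemain > 1 then
      (PySem.List.pyRange 0 2 1).map (fun i =>
        PySem.List.pyGetD (bfsNet net (deepRemain - 1) (PySem.List.pyGetD nextKey i [])) i [])
    else [[], []]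
  (PySem.List.pyRange 0 2 1).map (fun i =>
    PySem.Set.union (PySem.List.pyGetD thisLayer i []) (PySem.List.pyGetD nextLayer i []))
termination_by deepRemain.toNat
decreasing_by omega

-- the 'for key in nsmall' loop (dict iteration: items in insertion order, value = the
-- dict's value); 'agree = "b"; break' followed by 'return agree' is returning "b".
def netCompareGoA (net : PySem.Dict String (List (List String))) :
    List (String × List (List String)) → String
  | [] => "a"
  | (key, ks) :: rest =>
    if !net.contains key then "b"
    else
      let results := bfsNet net 2 (PySem.Set.ofList [key])
      -- Python's 'results[i] & ks[i] != ks[i]' on sets: Set.inter / Set.equal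
      if !(PySem.Set.equal (PySem.Set.inter (PySem.List.pyGetD results 0 []) (PySem.List.pyGetD ks 0 []))
              (PySem.List.pyGetD ks 0 []))
         || !(PySem.Set.equal (PySem.Set.inter (PySem.List.pyGetD results 1 []) (PySem.List.pyGetD ks 1 []))
              (PySem.List.pyGetD ks 1 [])) then "b"
      else netCompareGoA net rest

def net_compare (nbig : List (String × List (List String))) (nsmall : List (String × List (List String))) : String :=
  netCompareGoA (PySem.Dict.ofList nbig) (PySem.Dict.ofList nsmall).items

-- ===== PORT B =====
-- bfs_iter(net, key, i, max_deep): iterative BFS, frontier/acc pair folded over range(max_deep)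
def bfsIter (net : PySem.Dict String (List (List String))) (key : String) (i : Int) : PySem.Set String :=
  ((PySem.List.pyRange 0 2 1).foldl
    (fun (st : PySem.Set String × PySem.Set String) _ =>
      let layer : PySem.Set String :=
        st.2.foldl (fun l k => PySem.Set.union l (PySem.List.pyGetD (net.getD k []) i [])) PySem.Set.empty
      (PySem.Set.union st.1 layer, layer.filter (fun x => net.contains x)))
    (PySem.Set.empty, PySem.Set.ofList [key])).1

def netCompareGoB (net : PySem.Dict String (List (List String))) :
    List (String × List (List String)) → String
  | [] => "a"
  | (key, ks) :: rest =>
    if !net.contains key then "b"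
    else
      -- 'set(ks[i]) <= bfs_iter(...)' is Set.issubset
      if !(PySem.Set.issubset (PySem.Set.ofList (PySem.List.pyGetD ks 0 [])) (bfsIter net key 0)
           && PySem.Set.issubset (PySem.Set.ofList (PySem.List.pyGetD ks 1 [])) (bfsIter net key 1)) then "b"
      else netCompareGoB net rest

def net_compare_alt (nbig : List (String × List (List String))) (nsmall : List (String × List (List String))) : String :=
  netCompareGoB (PySem.Dict.ofList nbig) (PySem.Dict.ofList nsmall).items

-- ===== PRECONDITION & SPEC =====
-- Pre_ excludes inputs on which Python A raises IndexError: when the first key of nsmall is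
-- present in nbig the BFS indexes rows at positions 0 and 1, so every adjacency row must have
-- length ≥ 2; requiring that of ALL rows of both dicts slightly over-excludes (a too-short row
-- that the BFS never reaches also falls outside Pre_, although A then still returns — see cites).
def Pre_net_compare (nbig : List (String × List (List String))) (nsmall : List (String × List (List String))) : Prop :=
  (∀ q ∈ nbig, some q.1 ≠ nsmall.head?.map Prod.fst) ∨
    ((∀ q ∈ nbig, 2 ≤ q.2.length) ∧ (∀ q ∈ nsmall, 2 ≤ q.2.length))
instance (nbig : List (String × List (List String))) (nsmall : List (String × List (List String))) : Decidable (Pre_net_compare nbig nsmall) := by unfold Pre_net_compare; infer_instance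

def pvWitness_net_compare : (List (String × List (List String))) × (List (String × List (List String))) :=
  ([("a", [["b"], ["c"]]), ("b", [[], ["a"]])], [("a", [["b"], []])])

def Spec_net_compare (nbig : List (String × List (List String))) (nsmall : List (String × List (List String))) (out : String) : Prop := out = net_compare_alt nbig nsmall
instance (nbig : List (String × List (List String))) (nsmall : List (String × List (List String))) (out : String) : Decidable (Spec_net_compare nbig nsmall out) := by unfold Spec_net_compare; infer_instance

-- ===== CLAIM (what is proved, stated in full; the proofs are below) =====
def Claim_equal_net_compare : Prop := ∀ (nbig : List (String × List (List String))) (nsmall : List (String × List (List String))), Dom_net_compare nbig nsmall → Pre_net_compare nbig nsmall → Spec_net_compare nbig nsmall (net_compare nbig nsmall)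

-- ===== LEMMAS AND PROOFS =====

-- membership in a 'layer |= f k' fold
theorem mem_foldl_union (f : String → List String) (l : List String) (s0 : PySem.Set String)
    (x : String) :
    x ∈ l.foldl (fun s k => PySem.Set.union s (f k)) s0 ↔ x ∈ s0 ∨ ∃ k ∈ l, x ∈ f k := by
  induction l generalizing s0 with
  | nil => simp
  | cons k l ih => simp [ih, PySem.Set.mem_union, or_assoc]

-- the two BFSs from a single key reach the same elements (for the used indices 0 and 1)
theorem bfs_mem (net : PySem.Dict String (List (List String))) (key : String) (i : Int)
    (hi : i = 0 ∨ i = 1) (x : String) :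
    x ∈ PySem.List.pyGetD (bfsNet net 2 (PySem.Set.ofList [key])) i [] ↔ x ∈ bfsIter net key i := by
  have hrange : PySem.List.pyRange 0 2 1 = [0, 1] := by decide
  rcases hi with hi | hi <;> subst hi <;>
    simp [bfsNet, bfsIter, hrange, mem_foldl_union, PySem.Set.mem_union, PySem.Set.mem_ofList,
      List.mem_filter, PySem.List.pyGetD]

-- per-key: A's 'results[i] & ks[i] != ks[i] or …' test agrees with B's subset test
theorem cond_agree (net : PySem.Dict String (List (List String))) (key : String)
    (ks : List (List String)) :
    (!(PySem.Set.equal (PySem.Set.inter (PySem.List.pyGetD (bfsNet net 2 (PySem.Set.ofList [key])) 0 []) (PySem.List.pyGetD ks 0 []))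
          (PySem.List.pyGetD ks 0 []))
       || !(PySem.Set.equal (PySem.Set.inter (PySem.List.pyGetD (bfsNet net 2 (PySem.Set.ofList [key])) 1 []) (PySem.List.pyGetD ks 1 []))
          (PySem.List.pyGetD ks 1 [])))
      = !(PySem.Set.issubset (PySem.Set.ofList (PySem.List.pyGetD ks 0 [])) (bfsIter net key 0)
          && PySem.Set.issubset (PySem.Set.ofList (PySem.List.pyGetD ks 1 [])) (bfsIter net key 1)) := by
  have h : ∀ (i : Int), i = 0 ∨ i = 1 →
      PySem.Set.equal (PySem.Set.inter (PySem.List.pyGetD (bfsNet net 2 (PySem.Set.ofList [key])) i []) (PySem.List.pyGetD ks i []))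
          (PySem.List.pyGetD ks i [])
        = PySem.Set.issubset (PySem.Set.ofList (PySem.List.pyGetD ks i [])) (bfsIter net key i) := by
    intro i hi
    rw [Bool.eq_iff_iff, PySem.Set.equal_iff, PySem.Set.issubset_iff]
    constructor
    · intro h x hx
      rw [PySem.Set.mem_ofList] at hx
      exact (bfs_mem net key i hi x).mp ((PySem.Set.mem_inter _ _ _).mp ((h x).mpr hx)).1
    · intro h x
      rw [PySem.Set.mem_inter, bfs_mem net key i hi]
      exact ⟨fun hx => hx.2, fun hx => ⟨h x ((PySem.Set.mem_ofList _ _).mpr hx), hx⟩⟩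
  rw [h 0 (Or.inl rfl), h 1 (Or.inr rfl)]
  cases PySem.Set.issubset (PySem.Set.ofList (PySem.List.pyGetD ks 0 [])) (bfsIter net key 0) <;>
    cases PySem.Set.issubset (PySem.Set.ofList (PySem.List.pyGetD ks 1 [])) (bfsIter net key 1) <;> rfl

theorem go_agree (net : PySem.Dict String (List (List String)))
    (l : List (String × List (List String))) : netCompareGoA net l = netCompareGoB net l := by
  induction l with
  | nil => rfl
  | cons p rest ih =>
    obtain ⟨key, ks⟩ := p
    simp only [netCompareGoA, netCompareGoB, cond_agree, ih]

-- ===== VERDICT (by name: the statement is the Claim_ definition above) =====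
theorem net_compare_spec : Claim_equal_net_compare := by
  intro nbig nsmall _ _
  unfold Spec_net_compare net_compare net_compare_alt
  exact go_agree _ _
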